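-- pv_equiv track=rewrite | github.com/guilherme-nsr/beecrowd-sol | 1837.py | divisao
-- ===== SOURCE A (Python) =====
-- def modulo(n):
--     return -n if n < 0 else n
--
-- def divisao(a, b):
--     aux = modulo(a)
--
--     for i in range(modulo(b)):
--         for j in range(-aux, aux+1):
--             r = i
--             q = j
--
--             if b*q + r == a:
--                 return q, r
-- ===== SOURCE B (Python) =====
-- def divisao(a, b):
--     if b == 0:
--         return None
--     r = a % abs(b)
--     return (a - r) // b, r
-- ===== Notes on version B (the rewrite author's own statement) =====
-- stated objective: faster
-- what changed: replaces the double brute-force search over remainders and quotients by direct modular arithmetic: r = a mod |b| and q = (a-r)//b computed in O(1)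
import Mathlib
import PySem

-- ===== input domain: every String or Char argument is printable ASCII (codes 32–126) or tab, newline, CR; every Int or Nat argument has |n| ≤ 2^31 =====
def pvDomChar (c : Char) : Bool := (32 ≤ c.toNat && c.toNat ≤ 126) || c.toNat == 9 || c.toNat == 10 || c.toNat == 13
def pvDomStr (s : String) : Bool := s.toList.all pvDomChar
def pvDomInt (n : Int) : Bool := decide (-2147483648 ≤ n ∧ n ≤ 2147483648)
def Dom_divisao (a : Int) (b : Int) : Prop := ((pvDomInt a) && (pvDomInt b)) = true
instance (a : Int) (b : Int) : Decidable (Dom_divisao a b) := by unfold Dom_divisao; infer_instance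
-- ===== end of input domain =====

-- B replaces A's double brute-force search (over all remainders 0..|b|-1 and all
-- quotients -|a|..|a|) by O(1) modular arithmetic: r = a mod |b|, q = (a-r)//b.

-- ===== PORT A =====
def modulo (n : Int) : Int := if n < 0 then -n else n

-- 'for j in range(-aux, aux+1): if b*j+i == a: return (j, i)' as structural recursion
def divisaoInner (a b i : Int) (j stop : Int) : Option (Int × Int) :=
  if _h : j < stop then
    if b * j + i == a then some (j, i)
    else divisaoInner a b i (j + 1) stop
  else none
termination_by (stop - j).toNat
decreasing_by omega

-- 'for i in range(modulo b): <inner loop>' as structural recursion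
def divisaoOuter (a b aux : Int) (i stop : Int) : Option (Int × Int) :=
  if _h : i < stop then
    match divisaoInner a b i (-aux) (aux + 1) with
    | some p => some p
    | none => divisaoOuter a b aux (i + 1) stop
  else none
termination_by (stop - i).toNat
decreasing_by omega

def divisao (a : Int) (b : Int) : Option (Int × Int) :=
  let aux := modulo a
  divisaoOuter a b aux 0 (modulo b)

-- ===== PORT B =====
def divisao_alt (a : Int) (b : Int) : Option (Int × Int) :=
  if b == 0 then none
  else
    let r := PySem.Int.mod a |b|
    some (PySem.Int.floordiv (a - r) b, r)

-- ===== PRECONDITION & SPEC =====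
def Spec_divisao (a : Int) (b : Int) (out : Option (Int × Int)) : Prop := out = divisao_alt a b
instance (a : Int) (b : Int) (out : Option (Int × Int)) : Decidable (Spec_divisao a b out) := by unfold Spec_divisao; infer_instance

-- ===== CLAIM (what is proved, stated in full; the proofs are below) =====
def Claim_equal_divisao : Prop := ∀ (a : Int) (b : Int), Dom_divisao a b → Spec_divisao a b (divisao a b)

-- ===== LEMMAS AND PROOFS =====

-- findSome? returns the value at the unique element where f fires.
lemma findSome?_unique {α β : Type} (f : α → Option β) (x : α) (v : β) :
    ∀ (l : List α), x ∈ l → f x = some v → (∀ y ∈ l, y ≠ x → f y = none) →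
      l.findSome? f = some v := by
  intro l
  induction l with
  | nil => intro h; cases h
  | cons a l ih =>
    intro hx hfx hothers
    by_cases hax : a = x
    · subst hax; simp [hfx]
    · have ha : f a = none := hothers a (by simp) hax
      have hx' : x ∈ l := by
        rcases List.mem_cons.mp hx with h | h
        · exact absurd h.symm hax
        · exact h
      simp [ha]
      exact ih hx' hfx (fun y hy => hothers y (List.mem_cons_of_mem _ hy))

lemma findSome?_none {α β : Type} (f : α → Option β) :
    ∀ (l : List α), (∀ y ∈ l, f y = none) → l.findSome? f = none := by
  intro l
  induction l with
  | nil => intro; rfl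
  | cons a l ih =>
    intro h
    simp only [List.findSome?_cons, h a (by simp)]
    exact ih (fun y hy => h y (List.mem_cons_of_mem _ hy))


lemma divisaoInner_eq (a b i : Int) : ∀ (stop j : Int),
    divisaoInner a b i j stop
      = (PySem.List.pyRange j stop 1).findSome?
          (fun j => if b * j + i == a then some (j, i) else none) := by
  intro stop
  have hwf : ∀ n : Nat, ∀ j : Int, (stop - j).toNat = n →
      divisaoInner a b i j stop
        = (PySem.List.pyRange j stop 1).findSome?
            (fun j => if b * j + i == a then some (j, i) else none) := by
    intro n
    induction n with
    | zero =>
      intro j hj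
      rw [divisaoInner, dif_neg (by omega),
          PySem.List.pyRange_one_eq_nil (show stop ≤ j by omega)]
      rfl
    | succ n ih =>
      intro j hj
      rw [divisaoInner, dif_pos (by omega),
          PySem.List.pyRange_one_cons (show j < stop by omega), List.findSome?_cons]
      by_cases hc : b * j + i = a
      · simp [hc]
      · have hcb : (b * j + i == a) = false := by simp [hc]
        simpa [hcb] using ih (j + 1) (by omega)
  exact fun j => hwf (stop - j).toNat j rfl

lemma divisaoOuter_eq (a b aux : Int) : ∀ (stop i : Int),
    divisaoOuter a b aux i stop
      = (PySem.List.pyRange i stop 1).findSome?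
          (fun i => (PySem.List.pyRange (-aux) (aux + 1) 1).findSome?
            (fun j => if b * j + i == a then some (j, i) else none)) := by
  intro stop
  have hwf : ∀ n : Nat, ∀ i : Int, (stop - i).toNat = n →
      divisaoOuter a b aux i stop
        = (PySem.List.pyRange i stop 1).findSome?
            (fun i => (PySem.List.pyRange (-aux) (aux + 1) 1).findSome?
              (fun j => if b * j + i == a then some (j, i) else none)) := by
    intro n
    induction n with
    | zero =>
      intro i hi
      rw [divisaoOuter, dif_neg (by omega),
          PySem.List.pyRange_one_eq_nil (show stop ≤ i by omega)]
      rfl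
    | succ n ih =>
      intro i hi
      rw [divisaoOuter, dif_pos (by omega),
          PySem.List.pyRange_one_cons (show i < stop by omega), List.findSome?_cons,
          divisaoInner_eq a b i (aux + 1) (-aux)]
      cases hfs : (PySem.List.pyRange (-aux) (aux + 1) 1).findSome?
          (fun j => if b * j + i == a then some (j, i) else none) with
      | some p => rfl
      | none => exact ih (i + 1) (by omega)
  exact fun i => hwf (stop - i).toNat i rfl

lemma divisao_eq_findSome? (a b : Int) :
    divisao a b
      = (PySem.List.pyRange 0 (modulo b) 1).findSome?
          (fun i => (PySem.List.pyRange (-(modulo a)) (modulo a + 1) 1).findSome?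
            (fun j => if b * j + i == a then some (j, i) else none)) := by
  unfold divisao
  exact divisaoOuter_eq a b (modulo a) (modulo b) 0

lemma key (a b : Int) (hb : b ≠ 0) : divisao a b = divisao_alt a b := by
  have hm : (0:Int) < |b| := abs_pos.mpr hb
  have hrnn : 0 ≤ a % |b| := Int.emod_nonneg a (by omega)
  have hrlt : a % |b| < |b| := Int.emod_lt_of_pos a hm
  -- an exact quotient for the remainder a % |b|
  obtain ⟨q0, hdiv⟩ : ∃ q, b * q + a % |b| = a := by
    rcases lt_or_gt_of_ne hb with hbneg | hbpos
    · refine ⟨-(a / |b|), ?_⟩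
      have h1 : |b| * (a / |b|) + a % |b| = a := Int.mul_ediv_add_emod a |b|
      have h2 : |b| = -b := abs_of_neg hbneg
      have h3 : b * -(a / |b|) = |b| * (a / |b|) := by rw [h2]; ring
      omega
    · refine ⟨a / |b|, ?_⟩
      have h1 : |b| * (a / |b|) + a % |b| = a := Int.mul_ediv_add_emod a |b|
      have h2 : |b| = b := abs_of_pos hbpos
      have h3 : b * (a / |b|) = |b| * (a / |b|) := by rw [h2]
      omega
  -- abstract the remainder
  obtain ⟨r0, hr0⟩ : ∃ r, a % |b| = r := ⟨_, rfl⟩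
  rw [hr0] at hrnn hrlt hdiv
  have hmodb : modulo b = |b| := by
    unfold modulo
    rcases abs_cases b with ⟨he, h⟩ | ⟨he, h⟩ <;> rw [he] <;> split <;> omega
  have hmoda : modulo a = |a| := by
    unfold modulo
    rcases abs_cases a with ⟨he, h⟩ | ⟨he, h⟩ <;> rw [he] <;> split <;> omega
  -- bound on the quotient: -|a| ≤ q0 ≤ |a|
  have hqbound : -(modulo a) ≤ q0 ∧ q0 < modulo a + 1 := by
    rw [hmoda]
    have h1 : |b * q0| = |b| * |q0| := abs_mul b q0
    have h2 : |b * q0| ≤ |a| + |b| - 1 := by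
      rcases abs_cases (b * q0) with ⟨he, _⟩ | ⟨he, _⟩ <;>
        rcases abs_cases a with ⟨ha, _⟩ | ⟨ha, _⟩ <;> omega
    have h3 : |b| * |q0| < |b| * (|a| + 1) := by
      have h4 : |a| ≤ |a| * |b| := le_mul_of_one_le_right (abs_nonneg a) hm
      nlinarith [abs_nonneg a, abs_nonneg b]
    have h5 : |q0| < |a| + 1 := lt_of_mul_lt_mul_left h3 (abs_nonneg b)
    rcases abs_cases q0 with ⟨he, _⟩ | ⟨he, _⟩ <;>
      rcases abs_cases a with ⟨ha, _⟩ | ⟨ha, _⟩ <;> omega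
  -- inner loop: fires exactly at j = q0 when i = r0, never otherwise
  have inner_at : ∀ i : Int, 0 ≤ i → i < |b| →
      (PySem.List.pyRange (-(modulo a)) (modulo a + 1) 1).findSome?
        (fun j => if b * j + i == a then some (j, i) else none)
      = if i = r0 then some (q0, r0) else none := by
    intro i hinn hilt
    by_cases hi : i = r0
    · rw [if_pos hi]
      apply findSome?_unique _ q0
      · rw [PySem.List.mem_pyRange_one]; exact hqbound
      · rw [hi]; simp [hdiv]
      · intro y _ hy
        have hne : b * y + i ≠ a := by
          rw [hi]
          intro hcon
          have h1 : b * (y - q0) = 0 := by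
            have : b * (y - q0) = b * y - b * q0 := by ring
            omega
          rcases mul_eq_zero.mp h1 with h | h
          · exact hb h
          · exact hy (by omega)
        simp [hne]
    · rw [if_neg hi]
      apply findSome?_none
      intro y _
      have hne : b * y + i ≠ a := by
        intro hcon
        -- b*(q0 - y) = i - r0 with |i - r0| < |b| forces i = r0
        have heq : b * (q0 - y) = i - r0 := by
          have : b * (q0 - y) = b * q0 - b * y := by ring
          omega
        have habs : |b| * |q0 - y| = |i - r0| := by rw [← abs_mul, heq]
        have hlt : |i - r0| < |b| := by
          rcases abs_cases (i - r0) with ⟨he, _⟩ | ⟨he, _⟩ <;> omega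
        by_cases hz : q0 - y = 0
        · rw [hz, mul_zero] at heq; omega
        · have h1 : 1 ≤ |q0 - y| := by
            rcases abs_cases (q0 - y) with ⟨he, _⟩ | ⟨he, _⟩ <;> omega
          have h2 : |b| ≤ |b| * |q0 - y| := le_mul_of_one_le_right (by omega) h1
          omega
      simp [hne]
  -- assemble
  rw [divisao_eq_findSome?]
  unfold divisao_alt
  rw [if_neg (by simpa using hb)]
  simp only [hmodb]
  have houter : (PySem.List.pyRange 0 |b| 1).findSome?
      (fun i => (PySem.List.pyRange (-(modulo a)) (modulo a + 1) 1).findSome?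
        (fun j => if b * j + i == a then some (j, i) else none)) = some (q0, r0) := by
    apply findSome?_unique _ r0
    · rw [PySem.List.mem_pyRange_one]; exact ⟨hrnn, hrlt⟩
    · rw [inner_at r0 hrnn hrlt]; simp
    · intro y hy hne
      rw [PySem.List.mem_pyRange_one] at hy
      rw [inner_at y hy.1 hy.2, if_neg hne]
  rw [houter]
  -- B\'s pair equals (q0, r0)
  have hmodeq : PySem.Int.mod a |b| = r0 := by
    rw [PySem.Int.mod_eq_emod_of_pos hm, hr0]
  have hfd : PySem.Int.floordiv (a - PySem.Int.mod a |b|) b = q0 := by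
    rw [hmodeq]
    have har : a - r0 = b * q0 := by omega
    rw [har]
    have hm0 : PySem.Int.mod (b * q0) b = 0 :=
      (PySem.Int.mod_eq_zero_iff_dvd (b * q0) b).mpr (dvd_mul_right b q0)
    have hfm := PySem.Int.floordiv_mul_add_mod (b * q0) b
    rw [hm0, add_zero] at hfm
    have h6 : PySem.Int.floordiv (b * q0) b * b = q0 * b := by rw [mul_comm q0 b]; omega
    exact mul_right_cancel₀ hb h6
  rw [hfd, hmodeq]

theorem divisao_spec : Claim_equal_divisao := by
  intro a b _
  unfold Spec_divisao
  by_cases hb : b = 0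
  · subst hb
    rw [divisao_eq_findSome?]
    unfold divisao_alt
    simp [modulo, PySem.List.pyRange_one_eq_nil (le_refl (0:Int))]
  · exact key a b hb
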